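-- pv_equiv track=rewrite | github.com/pulilohith/hash | hashprob2.py | duplicatemax
-- ===== SOURCE A (Python) =====
-- def duplicatemax(arr):
--     mp={}
--     maximum=0
--     ans=0
--     for i in arr:
--         if(i not in mp):
--             mp[i]=1
--         else:
--             mp[i]+=1
--             if(maximum<mp[i]):
--                 maximum=mp[i]
--                 ans=i
--     return ans
-- ===== SOURCE B (Python) =====
-- def duplicatemax(arr):
--     cnt = {}
--     for i in arr:
--         cnt[i] = cnt.get(i, 0) + 1
--     m = max((cnt[i] for i in arr), default=0)
--     if m < 2:
--         return 0
--     run = {}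
--     for i in arr:
--         c = run.get(i, 0) + 1
--         if c == m:
--             return i
--         run[i] = c
--     return 0
-- ===== Notes on version B (the rewrite author's own statement) =====
-- stated objective: alternative
-- what changed: Replaces A's single-pass record-tracking (running max with inline answer updates) by a two-phase algorithm: build the full frequency table first, take the maximum count m (0 if below 2), then rescan with fresh running counts and return the first element whose running count reaches m.
import Mathlib
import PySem

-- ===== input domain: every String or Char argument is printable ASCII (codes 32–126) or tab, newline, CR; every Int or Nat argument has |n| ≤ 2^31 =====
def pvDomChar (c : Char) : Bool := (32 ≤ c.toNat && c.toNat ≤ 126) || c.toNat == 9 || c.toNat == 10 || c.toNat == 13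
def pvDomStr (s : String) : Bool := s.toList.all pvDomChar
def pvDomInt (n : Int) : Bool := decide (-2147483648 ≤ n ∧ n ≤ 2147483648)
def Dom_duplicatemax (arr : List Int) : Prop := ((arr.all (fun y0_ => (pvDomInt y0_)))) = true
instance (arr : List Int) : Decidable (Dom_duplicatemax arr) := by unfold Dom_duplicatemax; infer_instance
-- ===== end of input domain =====

-- B replaces A's single-pass record tracking with a two-phase algorithm (frequency table
-- first, then a rescan for the first element reaching the maximum count); same cost.

-- ===== PORT A =====
-- the body of A's 'for i in arr' loop over state (mp, maximum, ans)
def dupStep (s : PySem.Dict Int Int × Int × Int) (i : Int) : PySem.Dict Int Int × Int × Int :=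
  if s.1.contains i = false then
    (s.1.insert i 1, s.2.1, s.2.2)
  else if s.2.1 < (s.1.insert i (s.1.getD i 0 + 1)).getD i 0 then
    (s.1.insert i (s.1.getD i 0 + 1), (s.1.insert i (s.1.getD i 0 + 1)).getD i 0, i)
  else
    (s.1.insert i (s.1.getD i 0 + 1), s.2.1, s.2.2)

def duplicatemax (arr : List Int) : Int :=
  (arr.foldl dupStep (PySem.Dict.empty, 0, 0)).2.2

-- ===== PORT B =====
-- second pass of B: running counts, return the first i whose running count reaches m
def dupLoop (m : Int) (run : PySem.Dict Int Int) : List Int → Int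
  | [] => 0
  | i :: rest =>
    if run.getD i 0 + 1 = m then i
    else dupLoop m (run.insert i (run.getD i 0 + 1)) rest

def duplicatemax_alt (arr : List Int) : Int :=
  let cnt := arr.foldl (fun d i => d.insert i (d.getD i 0 + 1)) PySem.Dict.empty
  let m := PySem.List.maxD (arr.map (fun i => cnt.getD i 0)) (fun x => x) 0
  if m < 2 then 0
  else dupLoop m PySem.Dict.empty arr

-- ===== PRECONDITION & SPEC =====
def Spec_duplicatemax (arr : List Int) (out : Int) : Prop := out = duplicatemax_alt arr
instance (arr : List Int) (out : Int) : Decidable (Spec_duplicatemax arr out) := by unfold Spec_duplicatemax; infer_instance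

-- ===== CLAIM (what is proved, stated in full; the proofs are below) =====
def Claim_equal_duplicatemax : Prop := ∀ (arr : List Int), Dom_duplicatemax arr → Spec_duplicatemax arr (duplicatemax arr)

-- ===== LEMMAS AND PROOFS =====

-- maximum multiplicity of any element of p (0 for the empty list)
def mc (p : List Int) : Nat := p.foldl (fun acc y => max acc (p.count y)) 0

theorem foldl_max_le_nat (l : List Int) (f : Int → Nat) (b : Nat) :
    ∀ a, a ≤ b → (∀ x ∈ l, f x ≤ b) → l.foldl (fun acc y => max acc (f y)) a ≤ b := by
  induction l with
  | nil => intro a ha _; exact ha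
  | cons x t ih =>
    intro a ha hf
    exact ih _ (max_le ha (hf x (List.mem_cons_self))) (fun y hy => hf y (List.mem_cons_of_mem x hy))

theorem count_le_mc (p : List Int) (x : Int) : p.count x ≤ mc p := by
  by_cases hx : x ∈ p
  · exact (PySem.List.le_foldl_max_nat p (fun y => p.count y) 0).2 x hx
  · simp [List.count_eq_zero_of_not_mem hx]

theorem mc_le_mc_append (p r : List Int) : mc p ≤ mc (p ++ r) := by
  apply foldl_max_le_nat
  · exact Nat.zero_le _
  · intro x _
    calc p.count x ≤ (p ++ r).count x := by simp [List.count_append]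
      _ ≤ mc (p ++ r) := count_le_mc _ _

theorem count_snoc_self (p : List Int) (i : Int) : (p ++ [i]).count i = p.count i + 1 := by
  rw [List.count_append, List.count_cons_self]; rfl

theorem count_snoc_ne (p : List Int) (i x : Int) (h : x ≠ i) : (p ++ [i]).count x = p.count x := by
  rw [List.count_append]
  simp [Ne.symm h]

theorem count_snoc_le_mc (p : List Int) (i : Int) : p.count i + 1 ≤ mc (p ++ [i]) := by
  rw [← count_snoc_self p i]
  exact count_le_mc _ i

theorem mc_snoc_cases (p : List Int) (i : Int) :
    mc (p ++ [i]) = mc p ∨ mc (p ++ [i]) = p.count i + 1 := by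
  have hle : mc (p ++ [i]) ≤ max (mc p) (p.count i + 1) := by
    apply foldl_max_le_nat
    · exact Nat.zero_le _
    · intro x hx
      by_cases hxi : x = i
      · subst hxi
        rw [count_snoc_self]
        exact le_max_right _ _
      · rw [count_snoc_ne p i x hxi]
        exact le_max_of_le_left (count_le_mc p x)
  have h1 := mc_le_mc_append p [i]
  have h2 := count_snoc_le_mc p i
  rcases max_choice (mc p) (p.count i + 1) with h | h <;> rw [h] at hle <;> omega

-- dict invariants through one insertion
theorem getD_snoc (p : List Int) (i : Int) (d : PySem.Dict Int Int)
    (hget : ∀ x, d.getD x 0 = (p.count x : Int)) (v : Int) (hv : v = (p.count i : Int) + 1) :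
    ∀ x, (d.insert i v).getD x 0 = ((p ++ [i]).count x : Int) := by
  intro x
  rw [PySem.Dict.getD_insert]
  by_cases hxi : x = i
  · subst hxi
    rw [if_pos rfl, hv, count_snoc_self]
    push_cast; ring
  · rw [if_neg hxi, hget, count_snoc_ne p i x hxi]

theorem contains_snoc (p : List Int) (i : Int) (d : PySem.Dict Int Int)
    (hcon : ∀ x, d.contains x = decide (x ∈ p)) (v : Int) :
    ∀ x, (d.insert i v).contains x = decide (x ∈ p ++ [i]) := by
  intro x
  rw [PySem.Dict.contains_insert, hcon]
  by_cases hxi : x = i <;> simp [hxi]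

-- one step of A's loop, by membership of i in mp
theorem dupStep_not_mem (mp : PySem.Dict Int Int) (maximum ans i : Int) (hc : mp.contains i = false) :
    dupStep (mp, maximum, ans) i = (mp.insert i 1, maximum, ans) := by
  simp [dupStep, hc]

theorem dupStep_mem (mp : PySem.Dict Int Int) (maximum ans i : Int) (hc : mp.contains i = true) :
    dupStep (mp, maximum, ans) i =
      if maximum < (mp.insert i (mp.getD i 0 + 1)).getD i 0 then
        (mp.insert i (mp.getD i 0 + 1), (mp.insert i (mp.getD i 0 + 1)).getD i 0, i)
      else (mp.insert i (mp.getD i 0 + 1), maximum, ans) := by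
  simp [dupStep, hc]

-- once A's running maximum is at least the maximum count of the whole list
-- (or no element of the whole list repeats), ans never changes
theorem foldA_tail (rest : List Int) : ∀ (p : List Int) (mp : PySem.Dict Int Int) (maximum ans : Int),
    (∀ x, mp.getD x 0 = (p.count x : Int)) →
    (∀ x, mp.contains x = decide (x ∈ p)) →
    ((mc (p ++ rest) : Int) ≤ maximum ∨ mc (p ++ rest) ≤ 1) →
    (rest.foldl dupStep (mp, maximum, ans)).2.2 = ans := by
  induction rest with
  | nil => intro p mp maximum ans _ _ _; rfl
  | cons i rest ih =>
    intro p mp maximum ans hget hcon hm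
    have hassoc : p ++ i :: rest = (p ++ [i]) ++ rest := by simp
    have hm' : (mc ((p ++ [i]) ++ rest) : Int) ≤ maximum ∨ mc ((p ++ [i]) ++ rest) ≤ 1 := by
      rw [← hassoc]; exact hm
    by_cases hmem : i ∈ p
    · have hc : mp.contains i = true := by rw [hcon]; simp [hmem]
      have hci : 1 ≤ p.count i := List.count_pos_iff.2 hmem
      have hgeti : (mp.insert i (mp.getD i 0 + 1)).getD i 0 = (p.count i : Int) + 1 := by
        rw [PySem.Dict.getD_insert, if_pos rfl, hget]
      have hle : p.count i + 1 ≤ mc (p ++ i :: rest) := by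
        have h1 : (p ++ i :: rest).count i = p.count i + ((i :: rest).count i) := List.count_append
        have h1' : (i :: rest).count i = rest.count i + 1 := List.count_cons_self
        have h2 := count_le_mc (p ++ i :: rest) i
        omega
      have hup : ¬ (maximum < (mp.insert i (mp.getD i 0 + 1)).getD i 0) := by
        rw [hgeti]
        rcases hm with h | h <;> omega
      rw [List.foldl_cons, dupStep_mem mp maximum ans i hc, if_neg hup]
      exact ih (p ++ [i]) _ maximum ans
        (getD_snoc p i mp hget _ (by rw [hget])) (contains_snoc p i mp hcon _) hm'
    · have hc : mp.contains i = false := by rw [hcon]; simp [hmem]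
      rw [List.foldl_cons, dupStep_not_mem mp maximum ans i hc]
      exact ih (p ++ [i]) _ maximum ans
        (getD_snoc p i mp hget 1 (by rw [List.count_eq_zero_of_not_mem hmem]; simp))
        (contains_snoc p i mp hcon 1) hm'

-- before the maximum count m is reached, A's continued fold agrees with B's rescan loop
theorem foldA_loopB (r : List Int) : ∀ (p : List Int) (mp run : PySem.Dict Int Int) (maximum ans : Int) (m : Nat),
    (∀ x, mp.getD x 0 = (p.count x : Int)) →
    (∀ x, mp.contains x = decide (x ∈ p)) →
    (∀ x, run.getD x 0 = (p.count x : Int)) →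
    maximum = (if 2 ≤ mc p then (mc p : Int) else 0) →
    2 ≤ m → mc p < m → mc (p ++ r) = m →
    (r.foldl dupStep (mp, maximum, ans)).2.2 = dupLoop (m : Int) run r := by
  induction r with
  | nil =>
    intro p mp run maximum ans m _ _ _ _ _ hlt hall
    simp at hall
    omega
  | cons i rest ih =>
    intro p mp run maximum ans m hget hcon hrun hmax hm2 hlt hall
    have hassoc : p ++ i :: rest = (p ++ [i]) ++ rest := by simp
    have hall' : mc ((p ++ [i]) ++ rest) = m := by rw [← hassoc]; exact hall
    have hd := mc_snoc_cases p i
    have hsn1 := mc_le_mc_append p [i]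
    have hsn2 := count_snoc_le_mc p i
    have hsn4 : mc (p ++ [i]) ≤ m := by
      have := mc_le_mc_append (p ++ [i]) rest
      omega
    by_cases hmem : i ∈ p
    · have hc : mp.contains i = true := by rw [hcon]; simp [hmem]
      have hci : 1 ≤ p.count i := List.count_pos_iff.2 hmem
      have hgeti : (mp.insert i (mp.getD i 0 + 1)).getD i 0 = (p.count i : Int) + 1 := by
        rw [PySem.Dict.getD_insert, if_pos rfl, hget]
      have hmget := getD_snoc p i mp hget _ (by rw [hget] : mp.getD i 0 + 1 = (p.count i : Int) + 1)
      have hmcon := contains_snoc p i mp hcon (mp.getD i 0 + 1)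
      have hrun' := getD_snoc p i run hrun _ (by rw [hrun] : run.getD i 0 + 1 = (p.count i : Int) + 1)
      by_cases hcm : p.count i + 1 = m
      · -- m is reached here: B returns i, A sets ans := i and never changes it again
        have hmaxlt : maximum < (mp.insert i (mp.getD i 0 + 1)).getD i 0 := by
          rw [hgeti, hmax]
          split_ifs with h2p <;> omega
        have hloop : dupLoop (m : Int) run (i :: rest) = i := by
          simp only [dupLoop]
          rw [if_pos (by rw [hrun]; omega)]
        rw [List.foldl_cons, dupStep_mem mp maximum ans i hc, if_pos hmaxlt, hloop]
        apply foldA_tail rest (p ++ [i]) _ _ i hmget hmcon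
        left
        rw [hall', hgeti]
        omega
      · -- not reached yet: both sides continue on rest
        have hcl : p.count i + 1 < m := by omega
        have hloop : dupLoop (m : Int) run (i :: rest)
            = dupLoop (m : Int) (run.insert i (run.getD i 0 + 1)) rest := by
          simp only [dupLoop]
          rw [if_neg (by rw [hrun]; omega)]
        rw [List.foldl_cons, dupStep_mem mp maximum ans i hc, hloop]
        by_cases hup : maximum < (mp.insert i (mp.getD i 0 + 1)).getD i 0
        · rw [if_pos hup]
          apply ih (p ++ [i]) _ _ _ _ m hmget hmcon hrun' _ hm2 (by omega) hall'
          rw [hgeti] at hup ⊢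
          by_cases h2p : 2 ≤ mc p
          · rw [if_pos h2p] at hmax
            rw [hmax] at hup
            rw [if_pos (by omega)]
            omega
          · rw [if_neg h2p] at hmax
            rw [hmax] at hup
            rw [if_pos (by omega)]
            omega
        · rw [if_neg hup]
          apply ih (p ++ [i]) _ _ _ _ m hmget hmcon hrun' _ hm2 (by omega) hall'
          rw [hgeti] at hup
          by_cases h2p : 2 ≤ mc p
          · rw [if_pos h2p] at hmax
            rw [hmax] at hup ⊢
            rw [if_pos (by omega)]
            omega
          · rw [if_neg h2p] at hmax
            rw [hmax] at hup
            exfalso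
            omega
    · -- i not yet seen: A records it, B's running count 1 cannot be m
      have hc : mp.contains i = false := by rw [hcon]; simp [hmem]
      have hcnt0 : p.count i = 0 := List.count_eq_zero_of_not_mem hmem
      have hloop : dupLoop (m : Int) run (i :: rest)
          = dupLoop (m : Int) (run.insert i (run.getD i 0 + 1)) rest := by
        simp only [dupLoop]
        rw [if_neg (by rw [hrun]; omega)]
      rw [List.foldl_cons, dupStep_not_mem mp maximum ans i hc, hloop]
      apply ih (p ++ [i]) _ _ _ _ m
        (getD_snoc p i mp hget 1 (by rw [hcnt0]; simp))
        (contains_snoc p i mp hcon 1)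
        (getD_snoc p i run hrun _ (by rw [hrun])) _ hm2 (by omega) hall'
      rw [hmax]
      split_ifs <;> omega

-- B's first phase computes m = mc arr (as an Int)
theorem maxD_counts (p : List Int) :
    PySem.List.maxD (p.map (fun i => ((p.count i : Nat) : Int))) (fun x => x) 0 = ((mc p : Nat) : Int) := by
  cases p with
  | nil => rfl
  | cons x t =>
    have hmap : (x :: t).map (fun i => (((x :: t).count i : Nat) : Int))
        = (((x :: t).count x : Nat) : Int) :: t.map (fun i => (((x :: t).count i : Nat) : Int)) := by
      simp
    have hmc : mc (x :: t) = t.foldl (fun acc y => max acc ((x :: t).count y)) ((x :: t).count x) := by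
      unfold mc
      rw [List.foldl_cons]
      congr 1
    rw [PySem.List.maxD, hmap, PySem.List.max?_id_cons, Option.getD_some, List.foldl_map, hmc]
    exact List.foldl_hom (Nat.cast : Nat → Int) (fun a y => (Nat.cast_max a ((x :: t).count y)).symm)

theorem dup_eq (arr : List Int) : duplicatemax arr = duplicatemax_alt arr := by
  have hmapeq : arr.map (fun i => (PySem.Dict.counter arr).getD i 0)
      = arr.map (fun i => ((arr.count i : Nat) : Int)) :=
    List.map_congr_left (fun x _ => PySem.Dict.getD_counter arr x)
  have hm : PySem.List.maxD (arr.map (fun i => (PySem.Dict.counter arr).getD i 0)) (fun x => x) 0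
      = ((mc arr : Nat) : Int) := by rw [hmapeq]; exact maxD_counts arr
  have hB : duplicatemax_alt arr
      = if ((mc arr : Nat) : Int) < 2 then 0 else dupLoop ((mc arr : Nat) : Int) PySem.Dict.empty arr := by
    show (if PySem.List.maxD (arr.map (fun i => (PySem.Dict.counter arr).getD i 0)) (fun x => x) 0 < 2 then (0 : Int)
      else dupLoop (PySem.List.maxD (arr.map (fun i => (PySem.Dict.counter arr).getD i 0)) (fun x => x) 0) PySem.Dict.empty arr) = _
    rw [hm]
  rw [hB]
  unfold duplicatemax
  have hmcnil : mc ([] : List Int) = 0 := rfl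
  by_cases h2 : 2 ≤ mc arr
  · rw [if_neg (by omega)]
    exact foldA_loopB arr [] PySem.Dict.empty PySem.Dict.empty 0 0 (mc arr)
      (by intro x; simp) (by intro x; simp) (by intro x; simp)
      (by rw [hmcnil]; rfl) h2 (by omega) (by simp)
  · rw [if_pos (by omega)]
    exact foldA_tail arr [] PySem.Dict.empty 0 0
      (by intro x; simp) (by intro x; simp)
      (Or.inr (by simp; omega))

-- ===== VERDICT (by name: the statement is the Claim_ definition above) =====
theorem duplicatemax_spec : Claim_equal_duplicatemax := by
  intro arr _
  unfold Spec_duplicatemax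
  exact dup_eq arr
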